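-- pv_equiv track=rewrite | github.com/scriptmaster/ext.c3l | ext/tls/T0/codes.py | encode_7e_signed
-- ===== SOURCE A (Python) =====
-- def encode_7e_signed(val, bw):
--     """Encode a signed integer in 7-bit little-endian base-128 format."""
--     length = 1
--     if val < 0:
--         w = val
--         while w < -0x40:
--             length += 1
--             w >>= 7
--     else:
--         w = val
--         while w >= 0x40:
--             length += 1
--             w >>= 7
--     if bw is not None:
--         for k in range((length - 1) * 7, -1, -7):
--             x = (val >> k) & 0x7F
--             if k > 0:
--                 x |= 0x80
--             bw.append(x)
--     return length
-- ===== SOURCE B (Python) =====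
-- def encode_7e_signed(val, bw):
--     """Encode a signed integer in 7-bit little-endian base-128 format.
--
--     Single-pass SLEB128-style collector: gather 7-bit groups little-endian
--     with the standard sign-aware stop test, then emit them reversed
--     (same big-endian order and same mutation of bw as the original)."""
--     groups = []
--     w = val
--     while True:
--         g = w & 0x7F
--         w >>= 7
--         groups.append(g)
--         if (w == 0 and not (g & 0x40)) or (w == -1 and (g & 0x40)):
--             break
--     if bw is not None:
--         last = len(groups) - 1
--         for i, g in enumerate(reversed(groups)):
--             bw.append(g if i == last else g | 0x80)
--     return len(groups)
-- ===== Notes on version B (the rewrite author's own statement) =====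
-- stated objective: idiomatic
-- what changed: Replaced A's two-phase precompute-length-then-indexed-emit (separate sign-cased while loop, then a downward range of shift amounts) by the standard single-pass SLEB128 collector: one loop gathers 7-bit groups little-endian with the sign-aware stop test, and the collected groups are emitted reversed; the returned count is the number of groups.
import Mathlib
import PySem

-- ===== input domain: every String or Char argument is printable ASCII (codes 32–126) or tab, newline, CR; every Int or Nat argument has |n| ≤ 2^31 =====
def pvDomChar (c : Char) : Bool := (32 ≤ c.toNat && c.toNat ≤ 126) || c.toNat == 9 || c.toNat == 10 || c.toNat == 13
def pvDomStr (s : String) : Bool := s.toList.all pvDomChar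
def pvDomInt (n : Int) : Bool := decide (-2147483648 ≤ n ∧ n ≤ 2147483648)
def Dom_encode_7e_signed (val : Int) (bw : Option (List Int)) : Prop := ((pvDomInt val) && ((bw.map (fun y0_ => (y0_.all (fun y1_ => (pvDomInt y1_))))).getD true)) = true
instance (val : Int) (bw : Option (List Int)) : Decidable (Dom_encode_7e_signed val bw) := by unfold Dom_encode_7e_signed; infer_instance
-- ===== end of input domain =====

-- B replaces A's precompute-length-then-indexed-emit structure by a single-pass SLEB128
-- group collector with the standard sign-aware stop test (objective: idiomatic).
-- NOTE: both Pythons append the same bytes to bw in place; the equivalence proved here is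
-- about the RETURN value (the byte count) — the mutation is not part of the Lean ports.

-- Termination helper, cited by the ports' decreasing_by.
theorem pvFd_natAbs_lt (w : Int) (h : w ≤ -2 ∨ 1 ≤ w) :
    (PySem.Int.floordiv w 128).natAbs < w.natAbs := by
  have h1 := PySem.Int.floordiv_mul_add_mod w 128
  have h2 : PySem.Int.mod w 128 = w % 128 := PySem.Int.mod_eq_emod_of_pos (by norm_num)
  have h3 : 0 ≤ w % 128 := Int.emod_nonneg w (by norm_num)
  have h4 : w % 128 < 128 := Int.emod_lt_of_pos w (by norm_num)
  omega

-- ===== PORT A =====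
-- while w < -0x40: length += 1; w >>= 7   (w >> 7 on Int is floor division by 128)
def pvLenNeg (w : Int) : Int :=
  if w < -64 then 1 + pvLenNeg (PySem.Int.floordiv w 128) else 1
  termination_by w.natAbs
  decreasing_by exact pvFd_natAbs_lt w (by omega)

-- while w >= 0x40: length += 1; w >>= 7
def pvLenPos (w : Int) : Int :=
  if 64 ≤ w then 1 + pvLenPos (PySem.Int.floordiv w 128) else 1
  termination_by w.natAbs
  decreasing_by exact pvFd_natAbs_lt w (by omega)

-- the bytes A appends to bw: for k in range((length-1)*7, -1, -7): x = (val >> k) & 0x7F; if k > 0: x |= 0x80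
-- (val >> k) & 0x7F = mod (floordiv val 2^k) 128, exact for every sign of val; x ∈ [0,0x80) so x | 0x80 = x + 128.
def pvEmitA (val : Int) (length : Int) : List Int :=
  (PySem.List.pyRange ((length - 1) * 7) (-1) (-7)).map (fun k =>
    let x := PySem.Int.mod (PySem.Int.floordiv val (2 ^ k.toNat)) 128
    if 0 < k then x + 128 else x)

def encode_7e_signed (val : Int) (bw : Option (List Int)) : Int :=
  let length := if val < 0 then pvLenNeg val else pvLenPos val
  -- the in-place bw.append side effects (return value unaffected)
  let _bw := match bw with
    | some b => b ++ pvEmitA val length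
    | none => []
  length

-- ===== PORT B =====
-- g = w & 0x7F (= mod w 128, exact for every sign); w >>= 7 (= floordiv w 128);
-- g ∈ [0,0x80) so g & 0x40 ≠ 0 ↔ 64 ≤ g.
def pvCollect (w : Int) : List Int :=
  let g := PySem.Int.mod w 128
  let w' := PySem.Int.floordiv w 128
  if _h : (w' = 0 ∧ g < 64) ∨ (w' = -1 ∧ 64 ≤ g) then [g]
  else g :: pvCollect w'
  termination_by w.natAbs
  decreasing_by
    refine pvFd_natAbs_lt w ?_
    by_cases h0 : w = 0
    · exfalso; apply _h; subst h0; left; constructor <;> decide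
    · by_cases h1 : w = -1
      · exfalso; apply _h; subst h1; right; constructor <;> decide
      · omega

def encode_7e_signed_alt (val : Int) (bw : Option (List Int)) : Int :=
  let groups := pvCollect val
  -- the in-place bw.append side effects: reversed groups, 0x80 on all but the last
  -- (g ∈ [0,0x80) so g | 0x80 = g + 128)
  let _bw := match bw with
    | some b => b ++ (groups.reverse.zipIdx.map
        (fun (p : Int × Nat) => if p.2 = groups.length - 1 then p.1 else p.1 + 128))
    | none => []
  (groups.length : Int)

-- ===== PRECONDITION & SPEC =====
def Spec_encode_7e_signed (val : Int) (bw : Option (List Int)) (out : Int) : Prop := out = encode_7e_signed_alt val bw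
instance (val : Int) (bw : Option (List Int)) (out : Int) : Decidable (Spec_encode_7e_signed val bw out) := by unfold Spec_encode_7e_signed; infer_instance

-- ===== CLAIM (what is proved, stated in full; the proofs are below) =====
def Claim_equal_encode_7e_signed : Prop := ∀ (val : Int) (bw : Option (List Int)), Dom_encode_7e_signed val bw → Spec_encode_7e_signed val bw (encode_7e_signed val bw)

-- ===== LEMMAS AND PROOFS =====

theorem pvDivMod (w : Int) :
    (PySem.Int.floordiv w 128) * 128 + PySem.Int.mod w 128 = w ∧
    0 ≤ PySem.Int.mod w 128 ∧ PySem.Int.mod w 128 < 128 := by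
  have h1 := PySem.Int.floordiv_mul_add_mod w 128
  have h2 : PySem.Int.mod w 128 = w % 128 := PySem.Int.mod_eq_emod_of_pos (by norm_num)
  have h3 : 0 ≤ w % 128 := Int.emod_nonneg w (by norm_num)
  have h4 : w % 128 < 128 := Int.emod_lt_of_pos w (by norm_num)
  omega

theorem pvCollect_length (w : Int) :
    ((pvCollect w).length : Int) = if w < 0 then pvLenNeg w else pvLenPos w := by
  induction hn : w.natAbs using Nat.strong_induction_on generalizing w with
  | _ n ih =>
  subst hn
  obtain ⟨hid, hlo, hhi⟩ := pvDivMod w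
  rw [pvCollect]
  split
  · rename_i hstop
    rcases hstop with ⟨hq, hr⟩ | ⟨hq, hr⟩
    · -- q = 0, g < 64: w ∈ [0, 64)
      rw [if_neg (by omega)]
      rw [pvLenPos, if_neg (by omega)]
      simp
    · -- q = -1, 64 ≤ g: w ∈ [-64, -1]
      rw [if_pos (by omega)]
      rw [pvLenNeg, if_neg (by omega)]
      simp
  · rename_i hstop
    push Not at hstop
    -- continue: w ≤ -65 or 64 ≤ w
    have hw : w ≤ -65 ∨ 64 ≤ w := by
      by_cases hq0 : PySem.Int.floordiv w 128 = 0
      · have := hstop.1 hq0; omega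
      · by_cases hq1 : PySem.Int.floordiv w 128 = -1
        · have := hstop.2 hq1; omega
        · omega
    have ihq := ih _ (pvFd_natAbs_lt w (by omega)) (PySem.Int.floordiv w 128) rfl
    simp only [List.length_cons]
    rcases hw with hw | hw
    · rw [if_pos (by omega : PySem.Int.floordiv w 128 < 0)] at ihq
      rw [if_pos (by omega : w < 0)]
      rw [pvLenNeg, if_pos (by omega)]
      push_cast
      omega
    · rw [if_neg (by omega : ¬ PySem.Int.floordiv w 128 < 0)] at ihq
      rw [if_neg (by omega : ¬ w < 0)]
      rw [pvLenPos, if_pos (by omega)]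
      push_cast
      omega

-- ===== VERDICT (by name: the statement is the Claim_ definition above) =====
theorem encode_7e_signed_spec : Claim_equal_encode_7e_signed := by
  intro val bw _
  unfold Spec_encode_7e_signed encode_7e_signed encode_7e_signed_alt
  exact (pvCollect_length val).symm
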